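-- pv_equiv track=rewrite | github.com/terrelledwards/LevyProject | wyscout_pdf_scraper_v3.py | refine_name
-- ===== SOURCE A (Python) =====
-- def refine_name(s):
--     new_string = []
--     i = 0
--     length = len(s)
--
--     while i < length:
--         c = s[i]
--
--         if c == ' ':
--             # Look ahead for the next non-space character
--             j = i + 1
--             while j < length and s[j] == ' ':
--                 j += 1
--
--             # If next non-space character is uppercase, keep one space
--             if j < length and s[j].isupper():
--                 new_string.append(' ')
--
--             # Skip all spaces (if next non-space character is lowercase or end of string)
--             i = j - 1
--         else:
--             # Add the current non-space character
--             new_string.append(c)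
--
--         i += 1
--
--     return ''.join(new_string)
-- ===== SOURCE B (Python) =====
-- def refine_name(s):
--     out = []
--     pending_space = False
--     for c in s:
--         if c == ' ':
--             pending_space = True
--         else:
--             if pending_space and c.isupper():
--                 out.append(' ')
--             out.append(c)
--             pending_space = False
--     return ''.join(out)
-- ===== Notes on version B (the rewrite author's own statement) =====
-- stated objective: simpler
-- what changed: Replaces the index-based while loop with a nested look-ahead scan by a single forward pass that defers a run of spaces into one boolean pending_space flag (constant-factor win: no indexing, no inner re-scan).
import Mathlib
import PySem

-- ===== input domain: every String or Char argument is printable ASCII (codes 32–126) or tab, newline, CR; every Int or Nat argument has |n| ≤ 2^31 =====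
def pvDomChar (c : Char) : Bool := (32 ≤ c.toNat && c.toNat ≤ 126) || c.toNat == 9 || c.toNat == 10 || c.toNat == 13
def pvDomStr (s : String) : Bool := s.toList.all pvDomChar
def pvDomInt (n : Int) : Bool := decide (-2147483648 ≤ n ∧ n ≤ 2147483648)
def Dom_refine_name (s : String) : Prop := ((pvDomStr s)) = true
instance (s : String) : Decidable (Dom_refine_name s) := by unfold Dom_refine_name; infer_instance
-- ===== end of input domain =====

-- B replaces A's index loop with inner look-ahead scan by a single pass with a pending_space flag (simpler decomposition).

-- ===== PORT A =====
-- inner 'while j < length and s[j] == ' '' look-ahead: skip the run of spaces, return the rest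
def pvSkipSpaces : List Char → List Char
  | [] => []
  | c :: rest => if c = ' ' then pvSkipSpaces rest else c :: rest

theorem pvSkipSpaces_length_le (l : List Char) : (pvSkipSpaces l).length ≤ l.length := by
  induction l with
  | nil => simp [pvSkipSpaces]
  | cons c rest ih =>
      simp only [pvSkipSpaces]
      split
      · exact Nat.le_trans ih (Nat.le_succ _)
      · exact Nat.le_refl _

-- the outer while loop of A, character by character
def pvLoopA : List Char → List Char
  | [] => []
  | c :: rest =>
      if c = ' ' then
        -- look ahead for the next non-space character; i jumps to j
        match _h : pvSkipSpaces rest with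
        | [] => []
        | d :: tail =>
            (if PySem.Chars.isupper d then [' '] else []) ++ pvLoopA (d :: tail)
      else
        c :: pvLoopA rest
termination_by l => l.length
decreasing_by
  · have := pvSkipSpaces_length_le rest
    rw [_h] at this
    simpa using Nat.lt_succ_of_le this
  · simp

def refine_name (s : String) : String := String.ofList (pvLoopA s.toList)

-- ===== PORT B =====
def pvLoopB (pending : Bool) : List Char → List Char
  | [] => []
  | c :: rest =>
      if c = ' ' then pvLoopB true rest
      else (if pending && PySem.Chars.isupper c then [' '] else []) ++ (c :: pvLoopB false rest)

def refine_name_alt (s : String) : String := String.ofList (pvLoopB false s.toList)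

-- ===== PRECONDITION & SPEC =====
def Spec_refine_name (s : String) (out : String) : Prop := out = refine_name_alt s
instance (s : String) (out : String) : Decidable (Spec_refine_name s out) := by unfold Spec_refine_name; infer_instance

-- ===== CLAIM (what is proved, stated in full; the proofs are below) =====
def Claim_equal_refine_name : Prop := ∀ (s : String), Dom_refine_name s → Spec_refine_name s (refine_name s)

-- ===== LEMMAS AND PROOFS =====
-- B's pending state equals A's look-ahead: after a space, B behaves as A does on the de-spaced rest
theorem pvLoopB_true (l : List Char) :
    pvLoopB true l =
      match pvSkipSpaces l with
      | [] => []
      | d :: tail => (if PySem.Chars.isupper d then [' '] else []) ++ pvLoopB false (d :: tail) := by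
  induction l with
  | nil => simp [pvLoopB, pvSkipSpaces]
  | cons c rest ih =>
      by_cases hc : c = ' '
      · simp only [pvLoopB, pvSkipSpaces, hc]
        exact ih
      · simp [pvLoopB, pvSkipSpaces, hc]

theorem pvLoopA_eq_pvLoopB (l : List Char) : pvLoopA l = pvLoopB false l := by
  induction l using pvLoopA.induct with
  | case1 => simp [pvLoopA, pvLoopB]
  | case2 rest h =>
      rw [pvLoopA, if_pos rfl, pvLoopB, if_pos rfl, pvLoopB_true, h]
  | case3 rest d tail h ih =>
      rw [pvLoopA, if_pos rfl, pvLoopB, if_pos rfl, pvLoopB_true, h]; simp [ih]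
  | case4 c rest hc ih =>
      simp [pvLoopA, pvLoopB, hc, ih]

-- ===== VERDICT (by name: the statement is the Claim_ definition above) =====
theorem refine_name_spec : Claim_equal_refine_name := by
  intro s _
  unfold Spec_refine_name refine_name refine_name_alt
  rw [pvLoopA_eq_pvLoopB]
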